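-- pv_equiv track=rewrite | github.com/rimichak/repository_security_checker | main.py | analyze_security
-- ===== SOURCE A (Python) =====
-- def analyze_security(findings):
--     score = 100
--
--     for _ in findings:
--         score -= 20
--
--     score = max(score, 0)
--
--     if score >= 80:
--         level = "Low Risk"
--     elif score >= 50:
--         level = "Medium Risk"
--     else:
--         level = "High Risk"
--
--     return score, level
-- ===== SOURCE B (Python) =====
-- # Table-driven: only 6 outcomes exist (n = 0..4 findings, or >= 5), so look the
-- # answer up directly by the number of findings instead of looping and comparing.
-- _OUTCOMES = [
--     (100, "Low Risk"),
--     (80, "Low Risk"),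
--     (60, "Medium Risk"),
--     (40, "High Risk"),
--     (20, "High Risk"),
-- ]
--
-- def analyze_security(findings):
--     n = len(findings)
--     return _OUTCOMES[n] if n < 5 else (0, "High Risk")
-- ===== Notes on version B (the rewrite author's own statement) =====
-- stated objective: faster
-- what changed: Replaces the per-finding subtraction loop and threshold if-chain with a direct O(1) table lookup indexed by len(findings) (capped at 5).
import Mathlib
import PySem

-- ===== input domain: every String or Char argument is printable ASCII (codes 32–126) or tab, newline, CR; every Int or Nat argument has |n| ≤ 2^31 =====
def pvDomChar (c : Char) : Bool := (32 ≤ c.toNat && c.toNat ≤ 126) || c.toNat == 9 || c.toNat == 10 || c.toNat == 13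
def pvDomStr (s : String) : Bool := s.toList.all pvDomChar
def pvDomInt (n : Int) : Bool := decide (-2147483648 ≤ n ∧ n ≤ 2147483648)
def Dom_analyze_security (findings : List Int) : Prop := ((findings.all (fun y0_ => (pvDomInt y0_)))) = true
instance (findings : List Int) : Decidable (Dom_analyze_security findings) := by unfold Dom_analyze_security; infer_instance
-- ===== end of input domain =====

-- B looks the result up in a 6-entry outcome table keyed by len(findings) instead of looping (faster, O(1)).

-- ===== PORT A =====
def analyze_security (findings : List Int) : Int × String :=
  let score : Int := findings.foldl (fun s _ => s - 20) 100
  let score := max score 0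
  let level := if score ≥ 80 then "Low Risk" else if score ≥ 50 then "Medium Risk" else "High Risk"
  (score, level)

-- ===== PORT B =====
def pvOutcomes : List (Int × String) :=
  [(100, "Low Risk"), (80, "Low Risk"), (60, "Medium Risk"), (40, "High Risk"), (20, "High Risk")]

def analyze_security_alt (findings : List Int) : Int × String :=
  let n := findings.length
  if n < 5 then pvOutcomes.getD n (0, "High Risk") else (0, "High Risk")

-- ===== PRECONDITION & SPEC =====
def Spec_analyze_security (findings : List Int) (out : Int × String) : Prop := out = analyze_security_alt findings
instance (findings : List Int) (out : Int × String) : Decidable (Spec_analyze_security findings out) := by unfold Spec_analyze_security; infer_instance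

-- ===== CLAIM (what is proved, stated in full; the proofs are below) =====
def Claim_equal_analyze_security : Prop := ∀ (findings : List Int), Dom_analyze_security findings → Spec_analyze_security findings (analyze_security findings)

-- ===== LEMMAS AND PROOFS =====

-- ===== VERDICT (by name: the statement is the Claim_ definition above) =====
theorem foldl_sub20 (findings : List Int) (s : Int) :
    findings.foldl (fun s _ => s - 20) s = s - 20 * (findings.length : Int) := by
  induction findings generalizing s with
  | nil => simp
  | cons x xs ih => simp [List.foldl, ih]; ring

theorem analyze_security_spec : Claim_equal_analyze_security := by
  intro findings _
  unfold Spec_analyze_security analyze_security analyze_security_alt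
  rw [foldl_sub20]
  by_cases h : findings.length < 5
  · interval_cases h' : findings.length <;> simp_all [pvOutcomes]
  · have h5 : (5 : Int) ≤ (findings.length : Int) := by exact_mod_cast Nat.le_of_not_lt h
    have : (100 : Int) - 20 * (findings.length : Int) ≤ 0 := by linarith
    simp [h, max_eq_right this]
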